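-- pv_equiv track=rewrite | github.com/niumeng07/code-dev | machine-learning/algorithm/11.aprior/aprior.py | createC1
-- ===== SOURCE A (Python) =====
-- def createC1(dataSet):
--     #构建集合C1  单项的候选集———C1是大小为1的所有候选项集的集合
--     C1=[]
--     for transaction in dataSet:     #   dataSet中的每一个样本
--         for item in transaction:    #   每个样本的每一个特征
--             if not [item] in C1:    #   所有出现过的特征在C1中有且只有一次
--                 C1.append([item])
--     C1.sort()       #   对C1进行排序
--     return list(map(frozenset,C1))  #   frozenset：一种Python类型，不可修改的set
--     pass
-- ===== SOURCE B (Python) =====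
-- def createC1(dataSet):
--     # sort all items once, then one linear pass keeping items that differ from the previous one
--     items = sorted(item for transaction in dataSet for item in transaction)
--     result = []
--     prev = None
--     for x in items:
--         if prev is None or x != prev:
--             result.append(frozenset([x]))
--             prev = x
--     return result
-- ===== Notes on version B (the rewrite author's own statement) =====
-- stated objective: faster
-- what changed: Instead of scanning the growing candidate list for every item (quadratic membership tests) and sorting at the end, B flattens all items, sorts once, and deduplicates in a single adjacent-comparison pass.
import Mathlib
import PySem

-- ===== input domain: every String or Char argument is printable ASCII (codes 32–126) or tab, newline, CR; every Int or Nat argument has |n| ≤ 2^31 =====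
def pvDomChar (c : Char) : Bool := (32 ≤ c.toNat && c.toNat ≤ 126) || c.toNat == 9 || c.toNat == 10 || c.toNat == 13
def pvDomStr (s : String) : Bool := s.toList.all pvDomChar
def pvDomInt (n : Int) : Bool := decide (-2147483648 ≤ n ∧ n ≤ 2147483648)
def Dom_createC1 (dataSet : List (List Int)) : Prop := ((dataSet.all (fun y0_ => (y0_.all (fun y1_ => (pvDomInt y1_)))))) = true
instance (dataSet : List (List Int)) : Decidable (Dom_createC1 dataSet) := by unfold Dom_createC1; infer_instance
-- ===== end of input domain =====

-- B replaces A's membership-scan dedup with final sort by flatten, sort once, then one adjacent-comparison dedup pass (faster).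


-- ===== PORT A =====
-- frozenset of a list is its distinct elements in order: PySem.Set.ofList
def createC1 (dataSet : List (List Int)) : List (List Int) :=
  let C1 : List (List Int) :=
    dataSet.foldl (fun C1 transaction =>
      transaction.foldl (fun C1 item =>
        if [item] ∈ C1 then C1 else C1 ++ [[item]]) C1) []
  (PySem.List.sorted C1 (fun x => x) false).map (fun t => PySem.Set.ofList t)

-- ===== PORT B =====
-- state of the loop: (result, prev); prev = none mirrors Python's `prev is None`
def createC1_alt (dataSet : List (List Int)) : List (List Int) :=
  let items := PySem.List.sorted (dataSet.flatMap (fun transaction => transaction)) (fun x => x) false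
  (items.foldl (fun (st : List (List Int) × Option Int) x =>
      match st.2 with
      | none => (st.1 ++ [[x]], some x)
      | some p => if x ≠ p then (st.1 ++ [[x]], some x) else st)
    ([], none)).1

-- ===== PRECONDITION & SPEC =====
def Spec_createC1 (dataSet : List (List Int)) (out : List (List Int)) : Prop := out = createC1_alt dataSet
instance (dataSet : List (List Int)) (out : List (List Int)) : Decidable (Spec_createC1 dataSet out) := by unfold Spec_createC1; infer_instance

-- ===== CLAIM (what is proved, stated in full; the proofs are below) =====
def Claim_equal_createC1 : Prop := ∀ (dataSet : List (List Int)), Dom_createC1 dataSet → Spec_createC1 dataSet (createC1 dataSet)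

-- ===== LEMMAS AND PROOFS =====

-- adjacent-dedup tail: what B's loop appends after the first element
def adjTail (p : Int) : List Int → List Int
  | [] => []
  | x :: xs => if x ≠ p then x :: adjTail x xs else adjTail p xs

-- B's loop step, named for the proofs (definitionally equal to the lambda in createC1_alt)
def stepB (st : List (List Int) × Option Int) (x : Int) : List (List Int) × Option Int :=
  match st.2 with
  | none => (st.1 ++ [[x]], some x)
  | some p => if x ≠ p then (st.1 ++ [[x]], some x) else st

-- A's accumulation over the flattened items is PySem.Set.ofList, mapped to singletons
theorem foldA_eq_add_map (L S : List Int) :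
    L.foldl (fun acc item => if [item] ∈ acc then acc else acc ++ [[item]])
      (S.map (fun x => [x]))
    = (L.foldl PySem.Set.add S).map (fun x => [x]) := by
  induction L generalizing S with
  | nil => rfl
  | cons x L ih =>
    have hmem : ([x] ∈ S.map (fun y => ([y] : List Int))) ↔ x ∈ S := by simp
    simp only [List.foldl_cons, PySem.Set.add_eq_ite]
    by_cases hx : x ∈ S
    · rw [if_pos (hmem.mpr hx), if_pos hx]; exact ih S
    · rw [if_neg (fun h => hx (hmem.mp h)), if_neg hx]
      have h := ih (S ++ [x])
      rw [List.map_append] at h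
      simpa using h

-- sorting singleton lists lexicographically is sorting the underlying ints
theorem insertBy_map (x : Int) (ys : List Int) :
    PySem.List.insertBy (fun a b => decide ((fun t => t) a < (fun t => t) b)) ([x] : List Int)
        (ys.map (fun z => [z]))
    = (PySem.List.insertBy (fun a b => decide ((fun t => t) a < (fun t => t) b)) x ys).map
        (fun z => [z]) := by
  induction ys with
  | nil => rfl
  | cons y ys ih =>
    have hd : decide (([x] : List Int) < [y]) = decide (x < y) := by
      simp [List.cons_lt_cons_iff]
    simp only [List.map_cons, PySem.List.insertBy]
    by_cases hxy : x < y
    · rw [if_pos (by simpa [hxy] using hd), if_pos (by simpa using hxy)]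
      simp
    · rw [if_neg (by simp [hd, hxy]), if_neg (by simpa using hxy)]
      simp [ih]

theorem sorted_map_singleton (S : List Int) :
    PySem.List.sorted (S.map (fun z => [z])) (fun x => x) false
      = (PySem.List.sorted S (fun x => x) false).map (fun z => [z]) := by
  rw [PySem.List.sorted_eq_foldl_insertBy, PySem.List.sorted_eq_foldl_insertBy]
  have key : ∀ (S acc : List Int),
      (S.map (fun z => [z])).foldl
        (fun acc x => PySem.List.insertBy (fun a b => decide ((fun t => t) a < (fun t => t) b)) x acc)
        (acc.map (fun z => [z]))
      = (S.foldl
          (fun acc x => PySem.List.insertBy (fun a b => decide ((fun t => t) a < (fun t => t) b)) x acc)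
          acc).map (fun z => [z]) := by
    intro S
    induction S with
    | nil => intro acc; rfl
    | cons x S ih =>
      intro acc
      simp only [List.map_cons, List.foldl_cons, insertBy_map]
      exact ih _
  simpa using key S []

theorem createC1_eq_canonical (dataSet : List (List Int)) :
    createC1 dataSet
      = (PySem.List.sorted (PySem.Set.ofList dataSet.flatten) (fun x => x) false).map
          (fun x => [x]) := by
  show (PySem.List.sorted
          (dataSet.foldl (fun C1 transaction =>
            transaction.foldl (fun C1 item =>
              if [item] ∈ C1 then C1 else C1 ++ [[item]]) C1) [])
          (fun x => x) false).map (fun t => PySem.Set.ofList t) = _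
  rw [← List.foldl_flatten]
  have h1 := foldA_eq_add_map dataSet.flatten []
  simp only [List.map_nil] at h1
  rw [h1, ← PySem.Set.ofList_eq_foldl, sorted_map_singleton, List.map_map]
  exact List.map_congr_left (fun x _ => rfl)

-- B's fold is adjTail mapped to singletons
theorem foldB_eq_adjTail (ys : List Int) (p : Int) (acc : List (List Int)) :
    (ys.foldl stepB (acc, some p)).1 = acc ++ (adjTail p ys).map (fun x => [x]) := by
  induction ys generalizing p acc with
  | nil => simp [adjTail]
  | cons x ys ih =>
    rw [List.foldl_cons]
    by_cases hx : x = p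
    · subst hx
      rw [show stepB (acc, some x) x = (acc, some x) from by simp [stepB]]
      rw [ih, show adjTail x (x :: ys) = adjTail x ys from by simp [adjTail]]
    · rw [show stepB (acc, some p) x = (acc ++ [[x]], some x) from by simp [stepB, hx]]
      rw [ih, show adjTail p (x :: ys) = x :: adjTail x ys from by simp [adjTail, hx]]
      simp

-- adjacent dedup of a sorted run is strictly increasing and keeps the members
theorem adjTail_sorted (xs : List Int) (p : Int)
    (h : (p :: xs).Pairwise (· ≤ ·)) :
    (p :: adjTail p xs).Pairwise (· < ·) ∧ (∀ z, z ∈ p :: adjTail p xs ↔ z ∈ p :: xs) := by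
  induction xs generalizing p with
  | nil => exact ⟨by simp [adjTail], by simp [adjTail]⟩
  | cons x xs ih =>
    have hpx : p ≤ x := (List.pairwise_cons.mp h).1 x (by simp)
    have htail : (x :: xs).Pairwise (· ≤ ·) := (List.pairwise_cons.mp h).2
    by_cases hx : x = p
    · subst hx
      obtain ⟨h1, h2⟩ := ih x htail
      rw [show adjTail x (x :: xs) = adjTail x xs from by simp [adjTail]]
      refine ⟨h1, fun z => ?_⟩
      rw [h2 z]
      simp only [List.mem_cons]
      tauto
    · have hplt : p < x := lt_of_le_of_ne hpx (fun e => hx e.symm)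
      obtain ⟨h1, h2⟩ := ih x htail
      rw [show adjTail p (x :: xs) = x :: adjTail x xs from by simp [adjTail, hx]]
      have hforall : ∀ z ∈ x :: adjTail x xs, p < z := by
        intro z hz
        rcases List.mem_cons.mp ((h2 z).mp hz) with h1' | h1'
        · exact h1' ▸ hplt
        · exact lt_of_lt_of_le hplt ((List.pairwise_cons.mp htail).1 z h1')
      refine ⟨List.pairwise_cons.mpr ⟨hforall, h1⟩, fun z => ?_⟩
      have hz := h2 z
      simp only [List.mem_cons] at hz ⊢
      tauto

-- ===== VERDICT (by name: the statement is the Claim_ definition above) =====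
theorem createC1_spec : Claim_equal_createC1 := by
  intro dataSet _
  show createC1 dataSet = createC1_alt dataSet
  rw [createC1_eq_canonical]
  show _ = ((PySem.List.sorted (dataSet.flatMap (fun transaction => transaction)) (fun x => x)
              false).foldl stepB (([], none) : List (List Int) × Option Int)).1
  rw [List.flatMap_id']
  cases hitems : PySem.List.sorted dataSet.flatten (fun x => x) false with
  | nil =>
    rw [(PySem.List.sorted_eq_nil_iff _ _ _).mp hitems]
    rfl
  | cons y ys =>
    have hpair : (y :: ys).Pairwise (· ≤ ·) := by
      have h := PySem.List.sorted_pairwise dataSet.flatten (fun x => x)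
      rw [hitems] at h
      exact h
    obtain ⟨hlt, hmem⟩ := adjTail_sorted ys y hpair
    have hcanon : PySem.List.sorted (PySem.Set.ofList dataSet.flatten) (fun x => x) false
        = y :: adjTail y ys := by
      apply PySem.List.sorted_eq_of_perm_of_pairwise_lt
      · refine (List.perm_ext_iff_of_nodup (hlt.imp ne_of_lt) (PySem.Set.nodup_ofList _)).mpr ?_
        intro z
        rw [hmem z, PySem.Set.mem_ofList]
        have hz := PySem.List.mem_sorted dataSet.flatten (fun x => x) false z
        rw [hitems] at hz
        exact hz
      · exact hlt
    rw [hcanon, List.foldl_cons,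
      show stepB ([], none) y = ([[y]], some y) from rfl,
      foldB_eq_adjTail]
    simp
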